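-- pv_equiv track=rewrite | github.com/RhenCloud/Cloud-Index | handlers/routes.py | build_crumbs
-- ===== SOURCE A (Python) =====
-- from typing import Any, Dict, List
--
-- def build_crumbs(prefix: str) -> List[Dict[str, str]]:
--     """根据当前前缀构建导航数据。"""
--     crumbs: List[Dict[str, str]] = []
--     if prefix:
--         segs = prefix.rstrip("/").split("/")
--         acc = ""
--         for seg in segs:
--             acc = acc + seg + "/"
--             crumbs.append({"name": seg, "prefix": acc})
--     return crumbs
-- ===== SOURCE B (Python) =====
-- from typing import Dict, List
--
--
-- def build_crumbs(prefix: str) -> List[Dict[str, str]]: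
--     """根据当前前缀构建导航数据。"""
--     if not prefix:
--         return []
--     segs = prefix.rstrip("/").split("/")
--     return [{"name": seg, "prefix": "/".join(segs[: i + 1]) + "/"}
--             for i, seg in enumerate(segs)]
-- ===== Notes on version B (the rewrite author's own statement) =====
-- stated objective: simpler
-- what changed: Replaces the loop that threads a mutable string accumulator through the iterations with a stateless comprehension that recomputes each crumb prefix directly by joining a slice of the segment list and appending the trailing slash.
import Mathlib
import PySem

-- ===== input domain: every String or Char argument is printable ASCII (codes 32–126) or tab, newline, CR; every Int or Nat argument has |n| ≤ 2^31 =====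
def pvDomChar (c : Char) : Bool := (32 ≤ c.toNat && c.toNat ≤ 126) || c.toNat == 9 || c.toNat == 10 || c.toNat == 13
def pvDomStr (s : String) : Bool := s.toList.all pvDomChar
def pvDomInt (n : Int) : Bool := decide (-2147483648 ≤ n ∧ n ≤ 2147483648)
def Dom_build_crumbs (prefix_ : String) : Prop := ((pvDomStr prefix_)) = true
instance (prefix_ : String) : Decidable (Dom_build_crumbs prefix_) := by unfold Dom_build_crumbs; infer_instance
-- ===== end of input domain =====

-- B replaces A's loop-carried string accumulator by a stateless comprehension that recomputes
-- each crumb's prefix directly as '/'.join(segs[:i+1]) + '/' (objective: simpler; not faster).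

-- hand port of s.rstrip("/") (PySem has no rstrip-with-chars): drop every trailing char in `chars`;
-- exact for any chars set, used by both Pythons on their shared first step
def pyRstripChars (cs : List Char) (chars : List Char) : List Char :=
  ((cs.reverse.dropWhile (· ∈ chars)).reverse)

-- ===== PORT A =====
def build_crumbs (prefix_ : String) : List (List (String × String)) :=
  if prefix_.toList ≠ [] then
    let segs := PySem.Chars.splitOn (pyRstripChars prefix_.toList ['/']) ['/']
    (segs.foldl
      (fun (st : List Char × List (List (String × String))) seg =>
        let acc := st.1 ++ seg ++ ['/']
        (acc, st.2 ++ [[("name", String.ofList seg), ("prefix", String.ofList acc)]]))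
      ([], [])).2
  else []

-- ===== PORT B =====
def build_crumbs_alt (prefix_ : String) : List (List (String × String)) :=
  if prefix_.toList = [] then []
  else
    let segs := PySem.Chars.splitOn (pyRstripChars prefix_.toList ['/']) ['/']
    (PySem.List.enumerate segs 0).map (fun p =>
      [("name", String.ofList p.2),
       ("prefix", String.ofList (PySem.Chars.join ['/'] (PySem.List.slice segs none (some (p.1 + 1))) ++ ['/']))])

-- ===== PRECONDITION & SPEC =====
def Spec_build_crumbs (prefix_ : String) (out : List (List (String × String))) : Prop := out = build_crumbs_alt prefix_
instance (prefix_ : String) (out : List (List (String × String))) : Decidable (Spec_build_crumbs prefix_ out) := by unfold Spec_build_crumbs; infer_instance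

-- ===== CLAIM (what is proved, stated in full; the proofs are below) =====
def Claim_equal_build_crumbs : Prop := ∀ (prefix_ : String), Dom_build_crumbs prefix_ → Spec_build_crumbs prefix_ (build_crumbs prefix_)

-- ===== LEMMAS AND PROOFS =====

-- the accumulator value after consuming the segments `done`
def pvAcc (done : List (List Char)) : List Char := (done.map (· ++ ['/'])).flatten

def pvCrumb (seg acc : List Char) : List (String × String) :=
  [("name", String.ofList seg), ("prefix", String.ofList acc)]

lemma pvAcc_append (done : List (List Char)) (s : List Char) :
    pvAcc (done ++ [s]) = pvAcc done ++ s ++ ['/'] := by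
  simp [pvAcc]

lemma pvAcc_eq_join (done : List (List Char)) (h : done ≠ []) :
    pvAcc done = PySem.Chars.join ['/'] done ++ ['/'] := by
  induction done with
  | nil => simp at h
  | cons s rest ih =>
    cases rest with
    | nil => simp [pvAcc, PySem.Chars.join_singleton]
    | cons t rest' =>
      rw [PySem.Chars.join_cons_cons]
      have := ih (by simp)
      simp [pvAcc] at this ⊢
      simp [this]

lemma pv_loop_eq (rest : List (List Char)) :
    ∀ (done : List (List Char)) (out : List (List (String × String))),
    (rest.foldl
      (fun (st : List Char × List (List (String × String))) seg =>
        let acc := st.1 ++ seg ++ ['/']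
        (acc, st.2 ++ [pvCrumb seg acc]))
      (pvAcc done, out)).2
    = out ++ (PySem.List.enumerate rest (done.length)).map
        (fun p => pvCrumb p.2 (pvAcc ((done ++ rest).take (p.1 + 1).toNat))) := by
  induction rest with
  | nil => intro done out; simp [PySem.List.enumerate_nil]
  | cons s rest ih =>
    intro done out
    have hstep : pvAcc done ++ s ++ ['/'] = pvAcc (done ++ [s]) := (pvAcc_append done s).symm
    simp only [List.foldl_cons, PySem.List.enumerate_cons, List.map_cons]
    rw [hstep, ih (done ++ [s]) (out ++ [pvCrumb s (pvAcc (done ++ [s]))])]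
    have h1 : ((done.length : Int) + 1).toNat = done.length + 1 := by omega
    have h2 : (done ++ s :: rest).take (done.length + 1) = done ++ [s] := by
      rw [show done ++ s :: rest = (done ++ [s]) ++ rest by simp]
      rw [List.take_append_of_le_length (by simp)]
      simp
    have h3 : ((done ++ [s]).length : Int) = (done.length : Int) + 1 := by simp
    simp only [h3, h1, h2]
    simp [List.append_assoc]

lemma pv_mem_enumerate_bounds {α : Type} {xs : List α} {p : Int × α}
    (h : p ∈ PySem.List.enumerate xs 0) : 0 ≤ p.1 ∧ (p.1 + 1).toNat ≤ xs.length ∧ xs ≠ [] := by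
  rw [PySem.List.mem_enumerate_iff] at h
  obtain ⟨k, hk, rfl⟩ := h
  refine ⟨by omega, by omega, ?_⟩
  intro hnil; rw [hnil] at hk; simp at hk

-- ===== VERDICT (by name: the statement is the Claim_ definition above) =====
theorem build_crumbs_spec : Claim_equal_build_crumbs := by
  intro prefix_ _
  unfold Spec_build_crumbs build_crumbs build_crumbs_alt
  by_cases h : prefix_.toList = []
  · simp [h]
  · simp only [h, ne_eq, not_false_eq_true, if_true]
    set segs := PySem.Chars.splitOn (pyRstripChars prefix_.toList ['/']) ['/'] with hsegs
    have := pv_loop_eq segs [] []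
    simp only [pvAcc, pvCrumb, List.map_nil, List.flatten_nil, List.length_nil, Int.natCast_zero,
      List.nil_append] at this
    simp only [if_neg (by simp : ¬False)] at *
    rw [this]
    apply List.map_congr_left
    intro p hp
    obtain ⟨hp0, hple, hne⟩ := pv_mem_enumerate_bounds hp
    rw [PySem.List.slice_to _ (by omega)]
    have htne : segs.take (p.1 + 1).toNat ≠ [] := by
      intro hc
      rcases List.take_eq_nil_iff.mp hc with hz | hz
      · omega
      · exact hne hz
    have hj := pvAcc_eq_join _ htne
    simp only [pvAcc] at hj
    rw [hj]
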